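-- pv_equiv track=rewrite | github.com/Perlence/algorithmic-toolbox | segments.py | dots
-- ===== SOURCE A (Python) =====
-- def dots(starts, ends):
--     so = sorted(zip(starts, ends), key=lambda se: se[1])
--     result = set()
--     while so:
--         _, d = so.pop(0)
--         result.add(d)
--         for s, e in so[:]:
--             if s <= d <= e:
--                 so.remove((s, e))
--             else:
--                 break
--     return result
-- ===== SOURCE B (Python) =====
-- def dots(starts, ends):
--     result = set()
--     d = None
--     for s, e in sorted(zip(starts, ends), key=lambda se: se[1]):
--         if d is None or s > d:
--             d = e
--             result.add(e)
--     return result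
-- ===== Notes on version B (the rewrite author's own statement) =====
-- stated objective: faster
-- what changed: Replaces A's quadratic while-loop of pop(0)/so.remove on a copied list with a single left-to-right pass over the end-sorted pairs that keeps only the last chosen dot, so the sort dominates the cost.
import Mathlib
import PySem

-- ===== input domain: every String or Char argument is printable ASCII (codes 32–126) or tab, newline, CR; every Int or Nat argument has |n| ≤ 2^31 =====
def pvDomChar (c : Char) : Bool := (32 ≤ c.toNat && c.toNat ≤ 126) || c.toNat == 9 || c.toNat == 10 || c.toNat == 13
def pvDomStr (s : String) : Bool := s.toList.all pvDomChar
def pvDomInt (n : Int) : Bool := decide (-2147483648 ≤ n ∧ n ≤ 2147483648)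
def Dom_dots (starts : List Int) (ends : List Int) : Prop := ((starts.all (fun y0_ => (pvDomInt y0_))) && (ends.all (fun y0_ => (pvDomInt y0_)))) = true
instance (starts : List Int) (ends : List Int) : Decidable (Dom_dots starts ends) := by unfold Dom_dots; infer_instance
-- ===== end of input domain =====

-- B replaces A's quadratic pop(0)/remove-on-a-copy loop by a single left-to-right pass
-- that keeps the last chosen dot; objective: faster (the sort now dominates).

-- ===== PORT A =====
-- inner 'for s, e in so[:]' loop: first argument is the live list so, recursion is on the copy.
-- so.remove((s, e)) always finds its element here (each removed pair is the current head of so),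
-- so the total '.getD so' never fires on the ValueError branch.
def dotsInnerA (d : Int) (so : List (Int × Int)) : List (Int × Int) → List (Int × Int)
  | [] => so
  | (s, e) :: rest =>
      if s ≤ d ∧ d ≤ e then
        dotsInnerA d ((PySem.List.remove? so (s, e)).getD so) rest
      else so

lemma dotsInnerA_length_le (d : Int) :
    ∀ (copy so : List (Int × Int)), (dotsInnerA d so copy).length ≤ so.length := by
  intro copy
  induction copy with
  | nil => intro so; simp [dotsInnerA]
  | cons p rest ih =>
      intro so
      obtain ⟨s, e⟩ := p
      by_cases h : s ≤ d ∧ d ≤ e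
      · simp only [dotsInnerA, if_pos h]
        refine le_trans (ih _) ?_
        by_cases hm : (s, e) ∈ so
        · rw [PySem.List.remove?_eq_some_erase so _ hm, Option.getD_some]
          exact List.length_erase_le
        · rw [(PySem.List.remove?_eq_none_iff so (s, e)).mpr hm]
          simp
      · simp [dotsInnerA, if_neg h]

-- the 'while so:' loop: pop(0), add its end, then run the inner removal loop on a copy
def dotsLoopA (so : List (Int × Int)) (result : PySem.Set Int) : List Int :=
  match so with
  | [] => result
  | (_, d) :: rest => dotsLoopA (dotsInnerA d rest rest) (PySem.Set.add result d)
termination_by so.length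
decreasing_by
  simpa using Nat.lt_succ_of_le (dotsInnerA_length_le d rest rest)

def dots (starts : List Int) (ends : List Int) : List Int :=
  dotsLoopA (PySem.List.sorted (starts.zip ends) (fun se => se.2) false) PySem.Set.empty

-- ===== PORT B =====
-- fold state: (last chosen dot or None, result set); pick e whenever d is None or s > d
def dotsAltStep (acc : Option Int × PySem.Set Int) (se : Int × Int) : Option Int × PySem.Set Int :=
  match acc.1 with
  | none => (some se.2, PySem.Set.add acc.2 se.2)
  | some d => if d < se.1 then (some se.2, PySem.Set.add acc.2 se.2) else acc

def dots_alt (starts : List Int) (ends : List Int) : List Int :=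
  ((PySem.List.sorted (starts.zip ends) (fun se => se.2) false).foldl
      dotsAltStep (none, PySem.Set.empty)).2

-- ===== PRECONDITION & SPEC =====
def Spec_dots (starts : List Int) (ends : List Int) (out : List Int) : Prop := out = dots_alt starts ends
instance (starts : List Int) (ends : List Int) (out : List Int) : Decidable (Spec_dots starts ends out) := by unfold Spec_dots; infer_instance

-- ===== CLAIM (what is proved, stated in full; the proofs are below) =====
def Claim_equal_dots : Prop := ∀ (starts : List Int) (ends : List Int), Dom_dots starts ends → Spec_dots starts ends (dots starts ends)

-- ===== LEMMAS AND PROOFS =====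

-- A's inner loop, run with the copy equal to the live list, drops exactly the matching prefix
lemma dotsInnerA_self (d : Int) :
    ∀ so : List (Int × Int),
      dotsInnerA d so so = so.dropWhile (fun p => decide (p.1 ≤ d) && decide (d ≤ p.2)) := by
  intro so
  induction so with
  | nil => simp [dotsInnerA]
  | cons p rest ih =>
      obtain ⟨s, e⟩ := p
      by_cases h : s ≤ d ∧ d ≤ e
      · simp only [dotsInnerA, if_pos h, PySem.List.remove?_cons_self, Option.getD_some]
        rw [ih, List.dropWhile_cons_of_pos (by simpa using h)]
      · simp only [dotsInnerA, if_neg h]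
        rw [List.dropWhile_cons_of_neg (by simpa using h)]

-- B's fold ignores every element whose start is ≤ the last chosen dot
lemma foldl_step_skip (d : Int) (res : PySem.Set Int) :
    ∀ l : List (Int × Int), (∀ p ∈ l, p.1 ≤ d) →
      l.foldl dotsAltStep (some d, res) = (some d, res) := by
  intro l
  induction l with
  | nil => intro _; rfl
  | cons p rest ih =>
      intro h
      have hp : ¬ d < p.1 := not_lt.mpr (h p (List.mem_cons_self))
      simp only [List.foldl_cons, dotsAltStep, if_neg hp]
      exact ih (fun q hq => h q (List.mem_cons_of_mem _ hq))

-- the element a dropWhile stops at fails the predicate (specific shape used below)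
lemma dropWhile_head_false {α : Type} (p : α → Bool) :
    ∀ (l : List α) (x : α) (xs : List α), l.dropWhile p = x :: xs → p x = false := by
  intro l
  induction l with
  | nil => intro x xs h; simp [List.dropWhile] at h
  | cons a t ih =>
      intro x xs h
      by_cases ha : p a
      · rw [List.dropWhile_cons_of_pos ha] at h; exact ih x xs h
      · rw [List.dropWhile_cons_of_neg ha] at h
        obtain ⟨rfl, -⟩ := List.cons.inj h
        simpa using ha

lemma loopA_eq_fold (n : Nat) :
    ∀ (so : List (Int × Int)) (res : PySem.Set Int), so.length ≤ n →
      so.Pairwise (fun a b => a.2 ≤ b.2) →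
      dotsLoopA so res = (so.foldl dotsAltStep (none, res)).2 := by
  induction n with
  | zero =>
      intro so res hlen _
      have : so = [] := List.eq_nil_of_length_eq_zero (Nat.le_zero.mp hlen)
      subst this; simp [dotsLoopA]
  | succ n ih =>
      intro so res hlen hpw
      match so with
      | [] => simp [dotsLoopA]
      | (s, d) :: rest =>
        have hends : ∀ p ∈ rest, d ≤ p.2 := (List.pairwise_cons.mp hpw).1
        have hrest : rest.Pairwise (fun a b => a.2 ≤ b.2) := (List.pairwise_cons.mp hpw).2
        set P : Int × Int → Bool := fun p => decide (p.1 ≤ d) && decide (d ≤ p.2) with hP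
        -- left side: one pop + prefix removal, then recurse on the suffix
        have hL : dotsLoopA ((s, d) :: rest) res
            = dotsLoopA (rest.dropWhile P) (PySem.Set.add res d) := by
          rw [dotsLoopA, dotsInnerA_self]
        have hdw_len : (rest.dropWhile P).length ≤ n := by
          have h1 := List.length_dropWhile_le P rest
          have h2 : rest.length ≤ n := by simpa using Nat.succ_le_succ_iff.mp hlen
          omega
        have hdw_pw : (rest.dropWhile P).Pairwise (fun a b => a.2 ≤ b.2) :=
          hrest.sublist (List.dropWhile_sublist P)
        -- right side: the first step chooses d, then the matching prefix is skipped
        have hR : ((s, d) :: rest).foldl dotsAltStep (none, res)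
            = rest.foldl dotsAltStep (some d, PySem.Set.add res d) := by
          simp [dotsAltStep]
        have hsplit : rest.foldl dotsAltStep (some d, PySem.Set.add res d)
            = (rest.dropWhile P).foldl dotsAltStep (some d, PySem.Set.add res d) := by
          conv_lhs => rw [← List.takeWhile_append_dropWhile (p := P) (l := rest)]
          rw [List.foldl_append, foldl_step_skip d _ _ (fun p hp => by
            have := List.mem_takeWhile_imp hp
            simp only [hP, Bool.and_eq_true, decide_eq_true_eq] at this
            exact this.1)]
        rw [hL, ih _ _ hdw_len hdw_pw, hR, hsplit]
        -- on the suffix, the head (if any) has start > d, so state (some d) acts like none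
        cases hdw : rest.dropWhile P with
        | nil => rfl
        | cons p r =>
          obtain ⟨s', e'⟩ := p
          have hfalse := dropWhile_head_false P _ _ _ hdw
          simp only [hP, Bool.and_eq_false_iff, decide_eq_false_iff_not, not_le] at hfalse
          have hmem : (s', e') ∈ rest :=
            (List.dropWhile_sublist P).mem (hdw ▸ List.mem_cons_self)
          have hs' : d < s' := by
            rcases hfalse with h1 | h2
            · exact h1
            · exact absurd (hends _ hmem) (not_le.mpr h2)
          simp only [List.foldl_cons, dotsAltStep, if_pos hs']

-- ===== VERDICT (by name: the statement is the Claim_ definition above) =====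
theorem dots_spec : Claim_equal_dots := by
  intro starts ends _
  unfold Spec_dots dots dots_alt
  exact loopA_eq_fold _ _ _ le_rfl
    (by simpa using PySem.List.sorted_pairwise (starts.zip ends) (fun se => se.2))
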